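-- pv_equiv track=rewrite | github.com/anand0906/DataStructures-Algorithms | Prefix Sum/Problems/Smallest Substring Containing Vowels in Even Counts.py | better
-- ===== SOURCE A (Python) =====
-- def better(n,word):
--     mini=n+1
--     for i in range(n):
--         cntVowels={k:0 for k in 'aeiou'}
--         for j in range(i,n):
--             if(word[j] in 'aeiou'):
--                 cntVowels[word[j]]+=1
--             flag=True
--             for ch,cnt in cntVowels.items():
--                 if(cnt%2!=0):
--                     flag=False
--                     break
--             if(flag):
--                 length=j-i+1
--                 mini=min(mini,length)
--     return mini
-- ===== SOURCE B (Python) =====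
-- def better(n, word):
--     # prefix-XOR parity bitmask of vowel counts; smallest substring with all
--     # vowels even = closest pair of equal prefix masks, tracked via last-seen index
--     bit = {'a': 1, 'e': 2, 'i': 4, 'o': 8, 'u': 16}
--     mini = n + 1
--     mask = 0
--     last = {0: 0}
--     for j in range(n):
--         c = word[j]
--         if c in bit:
--             mask ^= bit[c]
--         if mask in last:
--             mini = min(mini, j + 1 - last[mask])
--         last[mask] = j + 1
--     return mini
-- ===== Notes on version B (the rewrite author's own statement) =====
-- stated objective: faster
-- what changed: Replaced the all-substrings double loop with per-substring vowel recounting by a single pass keeping a 5-bit prefix parity mask of vowel counts and the last index at which each mask value was seen (equal prefix masks = all-even substring).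
import Mathlib
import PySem

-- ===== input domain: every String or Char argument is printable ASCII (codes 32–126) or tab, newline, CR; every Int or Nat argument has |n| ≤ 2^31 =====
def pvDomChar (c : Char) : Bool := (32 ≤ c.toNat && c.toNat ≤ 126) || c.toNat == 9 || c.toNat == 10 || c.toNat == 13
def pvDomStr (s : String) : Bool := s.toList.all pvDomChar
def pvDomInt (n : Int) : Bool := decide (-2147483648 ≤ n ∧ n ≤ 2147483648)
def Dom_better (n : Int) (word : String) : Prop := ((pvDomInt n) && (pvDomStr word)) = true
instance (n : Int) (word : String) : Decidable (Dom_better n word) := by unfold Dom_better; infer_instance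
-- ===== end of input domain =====

-- B replaces A's O(n^2) scan of all substrings (recounting vowels per substring) by one
-- O(n) pass over prefix vowel-parity bitmasks with a last-seen index per mask value.

-- ===== PORT A =====
-- literal transliteration of A: for each start i, recount vowels in a dict over j ∈ [i,n)
-- and take the min length over substrings whose five counts are all even.
def better (n : Int) (word : String) : Int :=
  let cs := word.toList
  (PySem.List.pyRange 0 n 1).foldl (fun mini i =>
    let init : PySem.Dict Char Int := PySem.Dict.ofList [('a',0),('e',0),('i',0),('o',0),('u',0)]
    ((PySem.List.pyRange i n 1).foldl (fun (st : PySem.Dict Char Int × Int) j =>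
      let c := PySem.List.pyGetD cs j ' '   -- word[j]; in range under Pre_better
      let d := if (['a','e','i','o','u'] : List Char).contains c
               then st.1.insert c (st.1.getD c 0 + 1) else st.1
      let flag := d.items.all (fun p => PySem.Int.mod p.2 2 == 0)
      if flag then (d, min st.2 (j - i + 1)) else (d, st.2)) (init, mini)).2
  ) (n + 1)

-- ===== PORT B =====
-- transliteration of Source B: prefix XOR mask of vowel parities, dict 'last' of the last
-- prefix index at which each mask value occurred.
def better_alt (n : Int) (word : String) : Int :=
  let cs := word.toList
  let bit : PySem.Dict Char Int := PySem.Dict.ofList [('a',1),('e',2),('i',4),('o',8),('u',16)]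
  let st := (PySem.List.pyRange 0 n 1).foldl
    (fun (st : Int × PySem.Dict Int Int × Int) j =>
      let c := PySem.List.pyGetD cs j ' '   -- word[j]; in range under Pre_better
      let mask := if bit.contains c then PySem.Int.bxor st.1 (bit.getD c 0) else st.1
      let mini := if st.2.1.contains mask then min st.2.2 (j + 1 - st.2.1.getD mask 0) else st.2.2
      (mask, st.2.1.insert mask (j + 1), mini))
    (0, PySem.Dict.ofList [((0:Int), (0:Int))], n + 1)
  st.2.2

-- ===== PRECONDITION & SPEC =====
-- Pre_ excludes exactly the inputs where A raises IndexError: n larger than the length of word.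
def Pre_better (n : Int) (word : String) : Prop := n ≤ (word.toList.length : Int)
instance (n : Int) (word : String) : Decidable (Pre_better n word) := by unfold Pre_better; infer_instance
def pvWitness_better : Int × String := (4, "beau")
def Spec_better (n : Int) (word : String) (out : Int) : Prop := out = better_alt n word
instance (n : Int) (word : String) (out : Int) : Decidable (Spec_better n word out) := by unfold Spec_better; infer_instance

-- ===== CLAIM (what is proved, stated in full; the proofs are below) =====
def Claim_equal_better : Prop := ∀ (n : Int) (word : String), Dom_better n word → Pre_better n word → Spec_better n word (better n word)

-- ===== LEMMAS AND PROOFS =====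

-- step function of A's inner loop (definitionally the lambda in `better`)
def pvStepA (cs : List Char) (i : Int) (st : PySem.Dict Char Int × Int) (j : Int) :
    PySem.Dict Char Int × Int :=
  let c := PySem.List.pyGetD cs j ' '
  let d := if (['a','e','i','o','u'] : List Char).contains c
           then st.1.insert c (st.1.getD c 0 + 1) else st.1
  let flag := d.items.all (fun p => PySem.Int.mod p.2 2 == 0)
  if flag then (d, min st.2 (j - i + 1)) else (d, st.2)

-- step function of B's loop (definitionally the lambda in `better_alt`)
def pvStepB (cs : List Char) (st : Int × PySem.Dict Int Int × Int) (j : Int) :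
    Int × PySem.Dict Int Int × Int :=
  let bit : PySem.Dict Char Int := PySem.Dict.ofList [('a',1),('e',2),('i',4),('o',8),('u',16)]
  let c := PySem.List.pyGetD cs j ' '
  let mask := if bit.contains c then PySem.Int.bxor st.1 (bit.getD c 0) else st.1
  let mini := if st.2.1.contains mask then min st.2.2 (j + 1 - st.2.1.getD mask 0) else st.2.2
  (mask, st.2.1.insert mask (j + 1), mini)

lemma pv_better_eq (n : Int) (word : String) : better n word =
    (PySem.List.pyRange 0 n 1).foldl (fun mini i =>
      ((PySem.List.pyRange i n 1).foldl (pvStepA word.toList i)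
        (PySem.Dict.ofList [('a',0),('e',0),('i',0),('o',0),('u',0)], mini)).2) (n + 1) := rfl

lemma pv_better_alt_eq (n : Int) (word : String) : better_alt n word =
    ((PySem.List.pyRange 0 n 1).foldl (pvStepB word.toList)
      (0, PySem.Dict.ofList [((0:Int), (0:Int))], n + 1)).2.2 := rfl

-- parity 5-tuple of the vowel counts of a list
def pvPar (l : List Char) : Bool × Bool × Bool × Bool × Bool :=
  (l.count 'a' % 2 == 1, l.count 'e' % 2 == 1, l.count 'i' % 2 == 1,
   l.count 'o' % 2 == 1, l.count 'u' % 2 == 1)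

-- the 5-bit integer encoding of a parity tuple (B's mask)
def pvEnc (p : Bool × Bool × Bool × Bool × Bool) : Int :=
  (if p.1 then 1 else 0) + (if p.2.1 then 2 else 0) + (if p.2.2.1 then 4 else 0) +
  (if p.2.2.2.1 then 8 else 0) + (if p.2.2.2.2 then 16 else 0)

-- the counts dict A maintains, as a function of the processed slice
def pvCDict (l : List Char) : PySem.Dict Char Int :=
  PySem.Dict.mk [('a', (l.count 'a' : Int)), ('e', (l.count 'e' : Int)), ('i', (l.count 'i' : Int)),
                 ('o', (l.count 'o' : Int)), ('u', (l.count 'u' : Int))]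

-- greatest k < j whose parity prefix equals that of prefix j (what B's `last` remembers)
def pvLast (cs : List Char) (j : Nat) : Option Nat :=
  (List.range j).reverse.find? (fun k => decide (pvPar (cs.take k) = pvPar (cs.take j)))

-- B's `last` dict contents after t processed characters
def pvF (cs : List Char) (t : Nat) (x : Int) : Option Nat :=
  (List.range (t+1)).reverse.find? (fun k => decide (pvEnc (pvPar (cs.take k)) = x))

-- candidate lengths as A enumerates them (start-major)
def pvValsA (cs : List Char) (N : Nat) : List Int :=
  (List.range N).flatMap (fun i =>
    (((List.range' 0 (N - i)).filter
        (fun (k : Nat) => decide (pvPar (cs.take i) = pvPar (cs.take (i+k+1))))).map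
      (fun (k : Nat) => (i:Int) + (k:Int) - (i:Int) + 1)))

-- candidate lengths as B finds them (end-major, best start only)
def pvValsB (cs : List Char) (N : Nat) : List Int :=
  (List.range N).flatMap (fun t => match pvLast cs (t+1) with
    | some k => [((t:Int) + 1 - (k:Int))] | none => [])

lemma pvEnc_inj : ∀ p q, pvEnc p = pvEnc q ↔ p = q := by decide

lemma pv_foldl_min_le (a : Int) (l1 l2 : List Int)
    (h : ∀ y ∈ l2, ∃ x ∈ l1, x ≤ y) : l1.foldl min a ≤ l2.foldl min a := by
  rcases PySem.List.foldl_min_mem l2 a with h0 | hm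
  · rw [h0]; exact (PySem.List.foldl_min_le l1 a).1
  · obtain ⟨x, hx, hxy⟩ := h _ hm
    exact le_trans ((PySem.List.foldl_min_le l1 a).2 x hx) hxy

lemma pv_foldl_min_flatMap {α : Type} (g : α → List Int) (l : List α) (a : Int) :
    l.foldl (fun acc x => (g x).foldl min acc) a = (l.flatMap g).foldl min a := by
  induction l generalizing a with
  | nil => rfl
  | cons x t ih => simp only [List.foldl_cons, List.flatMap_cons, List.foldl_append]; exact ih _

lemma pv_revRange_succ (p : Nat → Bool) (j : Nat) :
    ((List.range (j+1)).reverse).find? p = if p j then some j else (List.range j).reverse.find? p := by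
  simp only [List.range_succ, List.reverse_append, List.reverse_singleton, List.singleton_append]
  cases hp : p j <;> simp [hp]

lemma pv_find?_max (p : Nat → Bool) (j r : Nat) (h : (List.range j).reverse.find? p = some r) :
    p r = true ∧ r < j ∧ ∀ m, r < m → m < j → p m = false := by
  induction j generalizing r with
  | zero => simp at h
  | succ j ih =>
    rw [pv_revRange_succ] at h
    by_cases hj : p j = true
    · rw [if_pos hj] at h
      cases h
      exact ⟨hj, Nat.lt_succ_self _, fun m h1 h2 => absurd h2 (by omega)⟩
    · rw [if_neg hj] at h
      obtain ⟨h1, h2, h3⟩ := ih r h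
      refine ⟨h1, by omega, fun m hm1 hm2 => ?_⟩
      by_cases hmj : m = j
      · subst hmj; exact eq_false_of_ne_true hj
      · exact h3 m hm1 (by omega)

lemma pv_find?_exists (p : Nat → Bool) (j i : Nat) (hi : i < j) (hp : p i = true) :
    ∃ r, (List.range j).reverse.find? p = some r ∧ i ≤ r ∧ p r = true ∧ r < j := by
  induction j with
  | zero => omega
  | succ j ih =>
    rw [pv_revRange_succ]
    by_cases hj : p j = true
    · exact ⟨j, by rw [if_pos hj], by omega, hj, Nat.lt_succ_self _⟩
    · have hij : i < j := by
        rcases Nat.lt_succ_iff_lt_or_eq.mp hi with h | h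
        · exact h
        · subst h; exact absurd hp hj
      obtain ⟨r, h1, h2, h3, h4⟩ := ih hij
      exact ⟨r, by rw [if_neg hj]; exact h1, h2, h3, by omega⟩

lemma pv_mod2 (a : Nat) : (PySem.Int.mod (a:Int) 2 == 0) = (a % 2 == 0) := by
  rw [show ((2:Int)) = ((2:Nat):Int) by norm_num, PySem.Int.mod_natCast]
  rcases Nat.mod_two_eq_zero_or_one a with h | h <;> simp [h]

lemma pv_parity_comp (c1 c2 : Nat) :
    (((c2 % 2 == 1) : Bool) = false) ↔ (((c1 % 2 == 1) : Bool) = ((c1+c2) % 2 == 1)) := by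
  rcases Nat.mod_two_eq_zero_or_one c2 with h | h <;>
    rcases Nat.mod_two_eq_zero_or_one c1 with h1 | h1 <;> simp [Nat.add_mod, h, h1]

lemma pv_par_take (cs : List Char) (i s : Nat) :
    pvPar ((cs.drop i).take s) = (false,false,false,false,false) ↔
      pvPar (cs.take i) = pvPar (cs.take (i+s)) := by
  rw [List.take_add]
  simp only [pvPar, Prod.ext_iff, List.count_append]
  exact and_congr (pv_parity_comp _ _) (and_congr (pv_parity_comp _ _)
    (and_congr (pv_parity_comp _ _) (and_congr (pv_parity_comp _ _) (pv_parity_comp _ _))))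

lemma pv_flag (m : List Char) :
    ((pvCDict m).items.all (fun p => PySem.Int.mod p.2 2 == 0)) =
      decide (pvPar m = (false,false,false,false,false)) := by
  show ([('a', ((m.count 'a' : Nat) : Int)), ('e', (m.count 'e' : Int)), ('i', (m.count 'i' : Int)),
        ('o', (m.count 'o' : Int)), ('u', (m.count 'u' : Int))].all (fun p => PySem.Int.mod p.2 2 == 0)) = _
  simp only [List.all_cons, List.all_nil, pv_mod2, Bool.and_true]
  rcases Nat.mod_two_eq_zero_or_one (m.count 'a') with h1 | h1 <;>
  rcases Nat.mod_two_eq_zero_or_one (m.count 'e') with h2 | h2 <;>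
  rcases Nat.mod_two_eq_zero_or_one (m.count 'i') with h3 | h3 <;>
  rcases Nat.mod_two_eq_zero_or_one (m.count 'o') with h4 | h4 <;>
  rcases Nat.mod_two_eq_zero_or_one (m.count 'u') with h5 | h5 <;>
    simp [pvPar, Prod.ext_iff, h1, h2, h3, h4, h5]

lemma pv_count_append_ne (m : List Char) (c v : Char) (h : c ≠ v) :
    (m ++ [c]).count v = m.count v := by
  simp [List.count_append, h]

lemma pv_cdict_step (m : List Char) (c : Char) :
    (if (['a','e','i','o','u'] : List Char).contains c
     then (pvCDict m).insert c ((pvCDict m).getD c 0 + 1) else pvCDict m) = pvCDict (m ++ [c]) := by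
  by_cases ha : c = 'a'
  · subst ha
    show PySem.Dict.mk [('a', (m.count 'a' : Int) + 1), ('e', (m.count 'e' : Int)), ('i', (m.count 'i' : Int)),
        ('o', (m.count 'o' : Int)), ('u', (m.count 'u' : Int))] = _
    simp [pvCDict, pv_count_append_ne m 'a' 'e' (by decide),
      pv_count_append_ne m 'a' 'i' (by decide), pv_count_append_ne m 'a' 'o' (by decide),
      pv_count_append_ne m 'a' 'u' (by decide)]
  · by_cases he : c = 'e'
    · subst he
      show PySem.Dict.mk [('a', (m.count 'a' : Int)), ('e', (m.count 'e' : Int) + 1), ('i', (m.count 'i' : Int)),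
          ('o', (m.count 'o' : Int)), ('u', (m.count 'u' : Int))] = _
      simp [pvCDict, pv_count_append_ne m 'e' 'a' (by decide),
        pv_count_append_ne m 'e' 'i' (by decide), pv_count_append_ne m 'e' 'o' (by decide),
        pv_count_append_ne m 'e' 'u' (by decide)]
    · by_cases hi : c = 'i'
      · subst hi
        show PySem.Dict.mk [('a', (m.count 'a' : Int)), ('e', (m.count 'e' : Int)), ('i', (m.count 'i' : Int) + 1),
            ('o', (m.count 'o' : Int)), ('u', (m.count 'u' : Int))] = _
        simp [pvCDict, pv_count_append_ne m 'i' 'a' (by decide),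
          pv_count_append_ne m 'i' 'e' (by decide), pv_count_append_ne m 'i' 'o' (by decide),
          pv_count_append_ne m 'i' 'u' (by decide)]
      · by_cases ho : c = 'o'
        · subst ho
          show PySem.Dict.mk [('a', (m.count 'a' : Int)), ('e', (m.count 'e' : Int)), ('i', (m.count 'i' : Int)),
              ('o', (m.count 'o' : Int) + 1), ('u', (m.count 'u' : Int))] = _
          simp [pvCDict, pv_count_append_ne m 'o' 'a' (by decide),
            pv_count_append_ne m 'o' 'e' (by decide), pv_count_append_ne m 'o' 'i' (by decide),
            pv_count_append_ne m 'o' 'u' (by decide)]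
        · by_cases hu : c = 'u'
          · subst hu
            show PySem.Dict.mk [('a', (m.count 'a' : Int)), ('e', (m.count 'e' : Int)), ('i', (m.count 'i' : Int)),
                ('o', (m.count 'o' : Int)), ('u', (m.count 'u' : Int) + 1)] = _
            simp [pvCDict, pv_count_append_ne m 'u' 'a' (by decide),
              pv_count_append_ne m 'u' 'e' (by decide), pv_count_append_ne m 'u' 'i' (by decide),
              pv_count_append_ne m 'u' 'o' (by decide)]
          · rw [if_neg (by simp; exact ⟨ha, he, hi, ho, hu⟩)]
            simp [pvCDict, pv_count_append_ne m c 'a' ha, pv_count_append_ne m c 'e' he,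
              pv_count_append_ne m c 'i' hi, pv_count_append_ne m c 'o' ho, pv_count_append_ne m c 'u' hu]

lemma pv_innerA (cs : List Char) (i : Nat) :
    ∀ (e s : Nat) (mini : Int), i + s + e ≤ cs.length →
    (List.range' s e).foldl (fun st (k : Nat) => pvStepA cs ↑i st ((i:Int) + (k:Int)))
        (pvCDict ((cs.drop i).take s), mini)
      = (pvCDict ((cs.drop i).take (s+e)),
         ((((List.range' s e).filter
              (fun (k : Nat) => decide (pvPar (cs.take i) = pvPar (cs.take (i+k+1))))).map
            (fun (k : Nat) => (i:Int) + (k:Int) - (i:Int) + 1)).foldl min mini)) := by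
  intro e
  induction e with
  | zero => intro s mini h; simp
  | succ e ih =>
    intro s mini h
    rw [List.range'_succ]
    have hse : s + (e + 1) = (s + 1) + e := by omega
    rw [hse]
    simp only [List.foldl_cons, List.filter_cons]
    have hlen : i + s < cs.length := by omega
    have hcast : ((i:Int) + (s:Int)) = ((i + s : Nat) : Int) := by push_cast; ring
    have hchar : PySem.List.pyGetD cs ((i:Int) + (s:Int)) ' ' = cs[i+s] := by
      rw [hcast, PySem.List.pyGetD_natCast, List.getD_eq_getElem cs ' ' hlen]
    have hslice : (cs.drop i).take s ++ [cs[i+s]] = (cs.drop i).take (s+1) := by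
      rw [List.take_add_one]
      congr 1
      rw [List.getElem?_drop]
      simp [List.getElem?_eq_getElem (by omega : i + s < cs.length)]
    have hstep : pvStepA cs ↑i (pvCDict ((cs.drop i).take s), mini) ((i:Int) + (s:Int)) =
        (pvCDict ((cs.drop i).take (s+1)),
         if decide (pvPar (cs.take i) = pvPar (cs.take (i+s+1)))
         then min mini ((i:Int) + (s:Int) - (i:Int) + 1) else mini) := by
      show (let c := PySem.List.pyGetD cs ((i:Int) + (s:Int)) ' '
            let d := if (['a','e','i','o','u'] : List Char).contains c
                     then (pvCDict ((cs.drop i).take s)).insert c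
                            ((pvCDict ((cs.drop i).take s)).getD c 0 + 1)
                     else pvCDict ((cs.drop i).take s)
            let flag := d.items.all (fun p => PySem.Int.mod p.2 2 == 0)
            if flag then (d, min mini ((i:Int) + (s:Int) - (i:Int) + 1)) else (d, mini)) = _
      simp only [hchar, pv_cdict_step, hslice, pv_flag]
      rw [show (decide (pvPar ((cs.drop i).take (s+1)) = (false,false,false,false,false))) =
            (decide (pvPar (cs.take i) = pvPar (cs.take (i+s+1)))) from
          decide_eq_decide.mpr (pv_par_take cs i (s+1))]
      by_cases hP : pvPar (cs.take i) = pvPar (cs.take (i+s+1)) <;> simp [hP]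
    rw [hstep]
    by_cases hP : pvPar (cs.take i) = pvPar (cs.take (i+s+1))
    · rw [decide_eq_true hP]
      simp only [if_true, List.map_cons, List.foldl_cons]
      exact ih (s+1) _ (by omega)
    · rw [decide_eq_false hP]
      simp only [Bool.false_eq_true, if_false]
      exact ih (s+1) mini (by omega)

lemma pv_bxor_a : ∀ (p : Bool × Bool × Bool × Bool × Bool),
    PySem.Int.bxor (pvEnc p) 1 = pvEnc (!p.1, p.2.1, p.2.2.1, p.2.2.2.1, p.2.2.2.2) := by decide
lemma pv_bxor_e : ∀ (p : Bool × Bool × Bool × Bool × Bool),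
    PySem.Int.bxor (pvEnc p) 2 = pvEnc (p.1, !p.2.1, p.2.2.1, p.2.2.2.1, p.2.2.2.2) := by decide
lemma pv_bxor_i : ∀ (p : Bool × Bool × Bool × Bool × Bool),
    PySem.Int.bxor (pvEnc p) 4 = pvEnc (p.1, p.2.1, !p.2.2.1, p.2.2.2.1, p.2.2.2.2) := by decide
lemma pv_bxor_o : ∀ (p : Bool × Bool × Bool × Bool × Bool),
    PySem.Int.bxor (pvEnc p) 8 = pvEnc (p.1, p.2.1, p.2.2.1, !p.2.2.2.1, p.2.2.2.2) := by decide
lemma pv_bxor_u : ∀ (p : Bool × Bool × Bool × Bool × Bool),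
    PySem.Int.bxor (pvEnc p) 16 = pvEnc (p.1, p.2.1, p.2.2.1, p.2.2.2.1, !p.2.2.2.2) := by decide

lemma pv_flipbit (a : Nat) : (((a+1) % 2 == 1) : Bool) = !(a % 2 == 1) := by
  rcases Nat.mod_two_eq_zero_or_one a with h | h <;> simp [Nat.add_mod, h]

lemma pv_mask_step (l : List Char) (c : Char) :
    (if (PySem.Dict.ofList [('a',1),('e',2),('i',4),('o',8),('u',16)] : PySem.Dict Char Int).contains c
     then PySem.Int.bxor (pvEnc (pvPar l))
            ((PySem.Dict.ofList [('a',1),('e',2),('i',4),('o',8),('u',16)] : PySem.Dict Char Int).getD c 0)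
     else pvEnc (pvPar l)) = pvEnc (pvPar (l ++ [c])) := by
  by_cases ha : c = 'a'
  · subst ha
    rw [if_pos (by decide),
      show ((PySem.Dict.ofList [('a',1),('e',2),('i',4),('o',8),('u',16)] : PySem.Dict Char Int).getD 'a' 0) = (1:Int) from rfl,
      pv_bxor_a]
    congr 1
    simp [pvPar, pv_count_append_ne l 'a' 'e' (by decide),
      pv_count_append_ne l 'a' 'i' (by decide), pv_count_append_ne l 'a' 'o' (by decide),
      pv_count_append_ne l 'a' 'u' (by decide), pv_flipbit]
  · by_cases he : c = 'e'
    · subst he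
      rw [if_pos (by decide),
        show ((PySem.Dict.ofList [('a',1),('e',2),('i',4),('o',8),('u',16)] : PySem.Dict Char Int).getD 'e' 0) = (2:Int) from rfl,
        pv_bxor_e]
      congr 1
      simp [pvPar, pv_count_append_ne l 'e' 'a' (by decide),
        pv_count_append_ne l 'e' 'i' (by decide), pv_count_append_ne l 'e' 'o' (by decide),
        pv_count_append_ne l 'e' 'u' (by decide), pv_flipbit]
    · by_cases hi : c = 'i'
      · subst hi
        rw [if_pos (by decide),
          show ((PySem.Dict.ofList [('a',1),('e',2),('i',4),('o',8),('u',16)] : PySem.Dict Char Int).getD 'i' 0) = (4:Int) from rfl,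
          pv_bxor_i]
        congr 1
        simp [pvPar, pv_count_append_ne l 'i' 'a' (by decide),
          pv_count_append_ne l 'i' 'e' (by decide), pv_count_append_ne l 'i' 'o' (by decide),
          pv_count_append_ne l 'i' 'u' (by decide), pv_flipbit]
      · by_cases ho : c = 'o'
        · subst ho
          rw [if_pos (by decide),
            show ((PySem.Dict.ofList [('a',1),('e',2),('i',4),('o',8),('u',16)] : PySem.Dict Char Int).getD 'o' 0) = (8:Int) from rfl,
            pv_bxor_o]
          congr 1
          simp [pvPar, pv_count_append_ne l 'o' 'a' (by decide),
            pv_count_append_ne l 'o' 'e' (by decide), pv_count_append_ne l 'o' 'i' (by decide),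
            pv_count_append_ne l 'o' 'u' (by decide), pv_flipbit]
        · by_cases hu : c = 'u'
          · subst hu
            rw [if_pos (by decide),
              show ((PySem.Dict.ofList [('a',1),('e',2),('i',4),('o',8),('u',16)] : PySem.Dict Char Int).getD 'u' 0) = (16:Int) from rfl,
              pv_bxor_u]
            congr 1
            simp [pvPar, pv_count_append_ne l 'u' 'a' (by decide),
              pv_count_append_ne l 'u' 'e' (by decide), pv_count_append_ne l 'u' 'i' (by decide),
              pv_count_append_ne l 'u' 'o' (by decide), pv_flipbit]
          · rw [if_neg ?hc]
            case hc =>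
              intro hcon
              rw [show (PySem.Dict.ofList [('a',1),('e',2),('i',4),('o',8),('u',16)] : PySem.Dict Char Int)
                    = PySem.Dict.mk [('a',1),('e',2),('i',4),('o',8),('u',16)] from rfl] at hcon
              simp at hcon
              rcases hcon with h | h | h | h | h
              exacts [ha h.symm, he h.symm, hi h.symm, ho h.symm, hu h.symm]
            congr 1
            simp [pvPar, pv_count_append_ne l c 'a' ha, pv_count_append_ne l c 'e' he,
              pv_count_append_ne l c 'i' hi, pv_count_append_ne l c 'o' ho,
              pv_count_append_ne l c 'u' hu]

lemma pv_F_eq_last (cs : List Char) (t : Nat) :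
    pvF cs t (pvEnc (pvPar (cs.take (t+1)))) = pvLast cs (t+1) := by
  unfold pvF pvLast
  congr 1
  funext k
  exact decide_eq_decide.mpr (pvEnc_inj _ _)

lemma pv_F_succ (cs : List Char) (t : Nat) (x : Int) :
    pvF cs (t+1) x = if decide (pvEnc (pvPar (cs.take (t+1))) = x)
      then some (t+1) else pvF cs t x := by
  unfold pvF
  rw [pv_revRange_succ]

lemma pv_innerB (cs : List Char) :
    ∀ (e t : Nat) (last : PySem.Dict Int Int) (mini : Int),
      t + e ≤ cs.length →
      (∀ x, last.get? x = Option.map (fun (k : Nat) => (k:Int)) (pvF cs t x)) →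
      ((List.range' t e).foldl (fun st (k : Nat) => pvStepB cs st (k:Int))
          (pvEnc (pvPar (cs.take t)), last, mini)).2.2
        = ((List.range' t e).flatMap (fun (t' : Nat) =>
             match pvLast cs (t'+1) with
             | some k => [((t':Int) + 1 - (k:Int))]
             | none => ([] : List Int))).foldl min mini := by
  intro e
  induction e with
  | zero => intro t last mini h hlast; simp
  | succ e ih =>
    intro t last mini h hlast
    rw [List.range'_succ]
    simp only [List.foldl_cons, List.flatMap_cons, List.foldl_append]
    have hlen : t < cs.length := by omega
    have hchar : PySem.List.pyGetD cs (t:Int) ' ' = cs[t] := by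
      rw [PySem.List.pyGetD_natCast, List.getD_eq_getElem cs ' ' hlen]
    have hslice : cs.take t ++ [cs[t]] = cs.take (t+1) := by
      rw [List.take_add_one]
      congr 1
      simp [List.getElem?_eq_getElem hlen]
    have hmask : (if (PySem.Dict.ofList [('a',1),('e',2),('i',4),('o',8),('u',16)] :
          PySem.Dict Char Int).contains (cs[t])
        then PySem.Int.bxor (pvEnc (pvPar (cs.take t)))
              ((PySem.Dict.ofList [('a',1),('e',2),('i',4),('o',8),('u',16)] :
                PySem.Dict Char Int).getD (cs[t]) 0)
        else pvEnc (pvPar (cs.take t))) = pvEnc (pvPar (cs.take (t+1))) := by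
      rw [pv_mask_step, hslice]
    have hcont : last.contains (pvEnc (pvPar (cs.take (t+1)))) = (pvLast cs (t+1)).isSome := by
      rw [PySem.Dict.contains_eq_isSome_get?, hlast, Option.isSome_map, pv_F_eq_last]
    have hstep : pvStepB cs (pvEnc (pvPar (cs.take t)), last, mini) (t:Int) =
        (pvEnc (pvPar (cs.take (t+1))),
         last.insert (pvEnc (pvPar (cs.take (t+1)))) ((t:Int) + 1),
         match pvLast cs (t+1) with
         | some k => min mini ((t:Int) + 1 - (k:Int))
         | none => mini) := by
      show (let bit : PySem.Dict Char Int := PySem.Dict.ofList [('a',1),('e',2),('i',4),('o',8),('u',16)]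
            let c := PySem.List.pyGetD cs (t:Int) ' '
            let mask := if bit.contains c then PySem.Int.bxor (pvEnc (pvPar (cs.take t))) (bit.getD c 0)
                        else pvEnc (pvPar (cs.take t))
            let mini' := if last.contains mask then min mini ((t:Int) + 1 - last.getD mask 0) else mini
            (mask, last.insert mask ((t:Int) + 1), mini')) = _
      simp only [hchar, hmask]
      refine Prod.ext rfl (Prod.ext rfl ?_)
      show (if last.contains (pvEnc (pvPar (cs.take (t+1))))
            then min mini ((t:Int) + 1 - last.getD (pvEnc (pvPar (cs.take (t+1)))) 0) else mini) = _
      rw [hcont, PySem.Dict.getD_eq_get?_getD, hlast, pv_F_eq_last]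
      cases hL : pvLast cs (t+1) with
      | none => simp
      | some k => simp
    rw [hstep]
    have hinv : ∀ x, (last.insert (pvEnc (pvPar (cs.take (t+1)))) ((t:Int) + 1)).get? x =
        Option.map (fun (k : Nat) => (k:Int)) (pvF cs (t+1) x) := by
      intro x
      rw [PySem.Dict.get?_insert, pv_F_succ]
      by_cases hx : x = pvEnc (pvPar (cs.take (t+1)))
      · rw [if_pos hx, if_pos (by rw [hx]; simp)]
        simp only [Option.map_some, Option.some.injEq]
        push_cast
        ring
      · rw [if_neg hx, if_neg (by simp; exact fun hh => hx hh.symm), hlast]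
    have hrec := ih (t+1) (last.insert (pvEnc (pvPar (cs.take (t+1)))) ((t:Int) + 1))
      (match pvLast cs (t+1) with
       | some k => min mini ((t:Int) + 1 - (k:Int))
       | none => mini) (by omega) hinv
    rw [hrec]
    cases hL : pvLast cs (t+1) <;> simp

lemma pv_A_eq (word : String) (N : Nat) (h : N ≤ word.toList.length) :
    better (N:Int) word = (pvValsA word.toList N).foldl min ((N:Int)+1) := by
  rw [pv_better_eq, PySem.List.pyRange_one]
  simp only [Int.sub_zero, Int.toNat_natCast]
  rw [List.foldl_map]
  have hcongr : ∀ (acc : Int) (i : Nat), i ∈ List.range N →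
      ((PySem.List.pyRange (0 + (i:Int)) (N:Int) 1).foldl (pvStepA word.toList (0 + (i:Int)))
        (PySem.Dict.ofList [('a',0),('e',0),('i',0),('o',0),('u',0)], acc)).2
      = ((((List.range' 0 (N - i)).filter
            (fun (k : Nat) => decide (pvPar (word.toList.take i) = pvPar (word.toList.take (i+k+1))))).map
          (fun (k : Nat) => (i:Int) + (k:Int) - (i:Int) + 1)).foldl min acc) := by
    intro acc i hi
    have hiN : i < N := List.mem_range.mp hi
    simp only [zero_add]
    rw [PySem.List.pyRange_one, List.foldl_map]
    have h1 : ((N:Int) - (i:Int)).toNat = N - i := by omega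
    rw [h1, List.range_eq_range']
    have h2 := pv_innerA word.toList i (N - i) 0 acc (by omega)
    simp only [List.take_zero] at h2
    rw [show (PySem.Dict.ofList [('a',0),('e',0),('i',0),('o',0),('u',0)] : PySem.Dict Char Int)
          = pvCDict [] from rfl]
    rw [h2]
  rw [PySem.List.foldl_congr_mem _ _ _ _ hcongr]
  rw [pv_foldl_min_flatMap]
  rfl

lemma pv_B_eq (word : String) (N : Nat) (h : N ≤ word.toList.length) :
    better_alt (N:Int) word = (pvValsB word.toList N).foldl min ((N:Int)+1) := by
  rw [pv_better_alt_eq, PySem.List.pyRange_one]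
  simp only [Int.sub_zero, Int.toNat_natCast, zero_add]
  rw [List.foldl_map, List.range_eq_range']
  have hinit : ∀ x, (PySem.Dict.ofList [((0:Int),(0:Int))] : PySem.Dict Int Int).get? x
      = Option.map (fun (k : Nat) => (k:Int)) (pvF word.toList 0 x) := by
    intro x
    by_cases hx : x = 0
    · subst hx; rfl
    · have hne : pvEnc (pvPar ([] : List Char)) ≠ x := by
        intro hh; exact hx (by rw [← hh]; rfl)
      show (PySem.Dict.mk [((0:Int),(0:Int))]).get? x = _
      rw [PySem.Dict.get?_mk_cons]
      rw [if_neg (by simp; exact fun hh => hx hh.symm)]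
      unfold pvF
      rw [show (List.range (0+1)).reverse = [0] from rfl]
      rw [show (List.find? (fun k => decide (pvEnc (pvPar (List.take k word.toList)) = x)) [0])
            = none from by simp [List.find?, hne]]
      rfl
  have h0 : ((0:Int), (PySem.Dict.ofList [((0:Int),(0:Int))] : PySem.Dict Int Int), (N:Int)+1)
      = (pvEnc (pvPar (word.toList.take 0)), (PySem.Dict.ofList [((0:Int),(0:Int))] : PySem.Dict Int Int), (N:Int)+1) := rfl
  rw [h0, pv_innerB word.toList N 0 _ _ (by omega) hinit]
  unfold pvValsB
  rw [List.range_eq_range']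

lemma pv_memA (cs : List Char) (N i k' : Nat) (hi : i < N) (hk : k' < N - i)
    (hp : pvPar (cs.take i) = pvPar (cs.take (i+k'+1))) :
    ((i:Int) + (k':Int) - (i:Int) + 1) ∈ pvValsA cs N := by
  unfold pvValsA
  rw [List.mem_flatMap]
  exact ⟨i, List.mem_range.mpr hi, List.mem_map.mpr
    ⟨k', List.mem_filter.mpr ⟨List.mem_range'_1.mpr ⟨by omega, by omega⟩, decide_eq_true hp⟩, rfl⟩⟩

lemma pv_valsB_sub (cs : List Char) (N : Nat) :
    ∀ y ∈ pvValsB cs N, ∃ x ∈ pvValsA cs N, x ≤ y := by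
  intro y hy
  unfold pvValsB at hy
  rw [List.mem_flatMap] at hy
  obtain ⟨t, ht, hyt⟩ := hy
  have htN := List.mem_range.mp ht
  cases hL : pvLast cs (t+1) with
  | none => rw [hL] at hyt; simp at hyt
  | some k =>
    rw [hL] at hyt
    simp only [List.mem_singleton] at hyt
    unfold pvLast at hL
    obtain ⟨hpk, hkt, -⟩ := pv_find?_max _ _ _ hL
    have hp := of_decide_eq_true hpk
    refine ⟨_, pv_memA cs N k (t-k) (by omega) (by omega)
      (by rw [show k + (t-k) + 1 = t+1 by omega]; exact hp), ?_⟩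
    subst hyt
    have hkle : (k:Int) ≤ (t:Int) := by exact_mod_cast Nat.le_of_lt_succ hkt
    push_cast [Nat.cast_sub (Nat.le_of_lt_succ hkt)]
    omega

lemma pv_valsA_sub (cs : List Char) (N : Nat) :
    ∀ x ∈ pvValsA cs N, ∃ y ∈ pvValsB cs N, y ≤ x := by
  intro x hx
  unfold pvValsA at hx
  rw [List.mem_flatMap] at hx
  obtain ⟨i, hi, hxi⟩ := hx
  have hiN := List.mem_range.mp hi
  rw [List.mem_map] at hxi
  obtain ⟨k', hk', rfl⟩ := hxi
  rw [List.mem_filter] at hk'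
  obtain ⟨hkr, hkp⟩ := hk'
  have hk'N : k' < N - i := by have := List.mem_range'_1.mp hkr; omega
  have hp := of_decide_eq_true hkp
  obtain ⟨r, hr, hir, hpr, hrt⟩ := pv_find?_exists
    (fun k => decide (pvPar (cs.take k) = pvPar (cs.take (i + k' + 1)))) (i + k' + 1) i
    (by omega) (decide_eq_true hp)
  refine ⟨((i:Int) + (k':Int) + 1 - (r:Int)), ?_, ?_⟩
  · unfold pvValsB
    rw [List.mem_flatMap]
    refine ⟨i + k', List.mem_range.mpr (by omega), ?_⟩
    rw [show pvLast cs (i + k' + 1) = some r from hr]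
    simp only [List.mem_singleton]
    push_cast
    ring
  · have : (i:Int) ≤ (r:Int) := by exact_mod_cast hir
    omega

lemma pv_vals_eq (cs : List Char) (N : Nat) (a : Int) :
    (pvValsA cs N).foldl min a = (pvValsB cs N).foldl min a :=
  le_antisymm (pv_foldl_min_le a _ _ (pv_valsB_sub cs N))
    (pv_foldl_min_le a _ _ (pv_valsA_sub cs N))

-- ===== VERDICT (by name: the statement is the Claim_ definition above) =====
theorem better_spec : Claim_equal_better := by
  intro n word _hdom hpre
  unfold Spec_better
  by_cases h0 : 0 ≤ n
  · obtain ⟨N, rfl⟩ : ∃ N : Nat, n = (N:Int) := ⟨n.toNat, (Int.toNat_of_nonneg h0).symm⟩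
    have hN : N ≤ word.toList.length := by
      unfold Pre_better at hpre
      omega
    rw [pv_A_eq word N hN, pv_B_eq word N hN, pv_vals_eq]
  · rw [pv_better_eq, pv_better_alt_eq, PySem.List.pyRange_one_eq_nil (by omega)]
    rfl
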